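-- pv_equiv track=rewrite | github.com/shwetagupta9411/QuerySearch-information-retrieval | quesFive.py | parenthetic_contents
-- ===== SOURCE A (Python) =====
-- def parenthetic_contents(string):
--     """Generate parenthesized contents in string as pairs (level, contents)."""
--     stack = []
--     for i, c in enumerate(string):
--         if c == '{' or c == '(':
--             stack.append(i)
--         elif (c == '}'or c == ')') and stack:
--             start = stack.pop()
--             yield (len(stack), string[start + 1: i])
-- ===== SOURCE B (Python) =====
-- def parenthetic_contents(string):
--     """Generate parenthesized contents in string as pairs (level, contents).
--
--     Recursive descent: parse(i, level) scans from index i and returns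
--     (stop, pairs) where stop is the position of the close ending this level
--     (or len(string) if the input runs out) and pairs are the (level, contents)
--     pairs produced, children before parents, left to right.
--     """
--     n = len(string)
--
--     def parse(i, level):
--         out = []
--         while i < n:
--             c = string[i]
--             if c == '(' or c == '{':
--                 j, inner = parse(i + 1, level + 1)
--                 out.extend(inner)
--                 if j < n:  # matching close found at j
--                     out.append((level, string[i + 1: j]))
--                     i = j + 1
--                 else:      # open never closed: drop it
--                     i = j
--             elif c == ')' or c == '}':
--                 if level > 0:
--                     return i, out
--                 i += 1     # stray top-level close: skip
--             else:
--                 i += 1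
--         return i, out
--
--     yield from parse(0, 0)[1]
-- ===== Notes on version B (the rewrite author's own statement) =====
-- stated objective: alternative
-- what changed: Replaces the explicit index stack driving a single enumerate loop by a recursive-descent parser parse(i, level) that recurses on each open bracket and returns the position of the close ending its level, yielding children before parents.
import Mathlib
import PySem

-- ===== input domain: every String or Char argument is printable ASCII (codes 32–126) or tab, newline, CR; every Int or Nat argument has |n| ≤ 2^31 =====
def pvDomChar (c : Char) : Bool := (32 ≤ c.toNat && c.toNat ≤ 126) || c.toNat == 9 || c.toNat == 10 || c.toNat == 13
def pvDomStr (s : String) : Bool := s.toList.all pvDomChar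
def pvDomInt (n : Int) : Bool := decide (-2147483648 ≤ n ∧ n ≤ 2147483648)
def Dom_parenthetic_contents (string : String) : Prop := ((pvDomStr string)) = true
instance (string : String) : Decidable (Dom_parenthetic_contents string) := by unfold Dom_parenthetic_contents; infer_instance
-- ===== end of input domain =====

-- B replaces A's explicit index stack + enumerate loop by a recursive-descent parser
-- (parse i level returns the position of the close ending its level); same cost, different decomposition.

-- ===== PORT A =====
-- A's for-loop over enumerate(string); state = stack of open positions, yields become list elements
def goA (s : String) : List (Int × Char) → List Int → List (Int × String)
  | [], _ => []
  | (i, c) :: rest, stack =>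
    if c = '{' ∨ c = '(' then goA s rest (i :: stack)
    else if c = '}' ∨ c = ')' then
      match stack with
      | start :: stk =>
          ((stk.length : Int), PySem.Str.slice s (some (start + 1)) (some i)) :: goA s rest stk
      | [] => goA s rest []
    else goA s rest stack

def parenthetic_contents (string : String) : List (Int × String) :=
  goA string (PySem.List.enumerate string.toList 0) []

-- ===== PORT B =====
-- parse(i, level) from Source B; the returned stop position carries the invariant i ≤ stop,
-- which justifies termination of the continuation at stop + 1 (Source B's `i = j + 1`).
def parseB (cs : List Char) (s : String) (i level : Nat) : {p : Nat × List (Int × String) // i ≤ p.1} :=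
  if h : i < cs.length then
    let c := cs[i]
    if c = '(' ∨ c = '{' then
      match parseB cs s (i + 1) (level + 1) with
      | ⟨(j, inner), hj2⟩ =>
        if hj : j < cs.length then
          match parseB cs s (j + 1) level with
          | ⟨(k, rest), hk2⟩ =>
            ⟨(k, inner ++ ((level : Int), PySem.Str.slice s (some ((i : Int) + 1)) (some (j : Int))) :: rest),
             Nat.le_trans (Nat.le_of_succ_le hj2) (Nat.le_trans (Nat.le_succ j) hk2)⟩
        else ⟨(j, inner), Nat.le_of_succ_le hj2⟩
    else if c = ')' ∨ c = '}' then
      if 0 < level then ⟨(i, []), Nat.le_refl i⟩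
      else
        let r := parseB cs s (i + 1) level
        ⟨r.val, Nat.le_of_succ_le r.2⟩
    else
      let r := parseB cs s (i + 1) level
      ⟨r.val, Nat.le_of_succ_le r.2⟩
  else ⟨(i, []), Nat.le_refl i⟩
termination_by cs.length - i
decreasing_by
  · exact Nat.sub_succ_lt_self _ _ h
  · exact Nat.sub_lt_sub_left h (Nat.lt_succ_of_le (Nat.le_of_succ_le hj2))
  · exact Nat.sub_succ_lt_self _ _ h
  · exact Nat.sub_succ_lt_self _ _ h

def parenthetic_contents_alt (string : String) : List (Int × String) :=
  (parseB string.toList string 0 0).val.2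

-- ===== PRECONDITION & SPEC =====
def Spec_parenthetic_contents (string : String) (out : List (Int × String)) : Prop := out = parenthetic_contents_alt string
instance (string : String) (out : List (Int × String)) : Decidable (Spec_parenthetic_contents string out) := by unfold Spec_parenthetic_contents; infer_instance

-- ===== CLAIM (what is proved, stated in full; the proofs are below) =====
def Claim_equal_parenthetic_contents : Prop := ∀ (string : String), Dom_parenthetic_contents string → Spec_parenthetic_contents string (parenthetic_contents string)

-- ===== LEMMAS AND PROOFS =====

-- case-by-case value of parseB (proof-side unfolding lemmas)
lemma parseB_eq_stop (cs : List Char) (s : String) (i level : Nat) (h : ¬ i < cs.length) :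
    (parseB cs s i level).val = (i, []) := by
  rw [parseB, dif_neg h]

lemma parseB_eq_open (cs : List Char) (s : String) (i level : Nat)
    (h : i < cs.length) (ho : cs[i] = '(' ∨ cs[i] = '{') :
    (parseB cs s i level).val =
      (if (parseB cs s (i + 1) (level + 1)).val.1 < cs.length then
        ((parseB cs s ((parseB cs s (i + 1) (level + 1)).val.1 + 1) level).val.1,
         (parseB cs s (i + 1) (level + 1)).val.2 ++
           ((level : Int), PySem.Str.slice s (some ((i : Int) + 1))
              (some ((parseB cs s (i + 1) (level + 1)).val.1 : Int))) ::
           (parseB cs s ((parseB cs s (i + 1) (level + 1)).val.1 + 1) level).val.2)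
      else (parseB cs s (i + 1) (level + 1)).val) := by
  conv_lhs => rw [parseB]
  rw [dif_pos h]
  simp only [if_pos ho]
  rcases hX : parseB cs s (i + 1) (level + 1) with ⟨⟨j, inner⟩, hj2⟩
  by_cases hj : j < cs.length
  · rw [dif_pos hj]
    rcases hY : parseB cs s (j + 1) level with ⟨⟨k, rest⟩, hk2⟩
    rw [if_pos hj]
  · rw [dif_neg hj, if_neg hj]

lemma parseB_eq_close_pos (cs : List Char) (s : String) (i level : Nat)
    (h : i < cs.length) (ho : ¬ (cs[i] = '(' ∨ cs[i] = '{'))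
    (hc : cs[i] = ')' ∨ cs[i] = '}') (hl : 0 < level) :
    (parseB cs s i level).val = (i, []) := by
  conv_lhs => rw [parseB]
  rw [dif_pos h]
  simp only [if_neg ho, if_pos hc, if_pos hl]

lemma parseB_eq_skip (cs : List Char) (s : String) (i level : Nat)
    (h : i < cs.length) (ho : ¬ (cs[i] = '(' ∨ cs[i] = '{'))
    (hcl : ¬ (cs[i] = ')' ∨ cs[i] = '}') ∨ ¬ 0 < level) :
    (parseB cs s i level).val = (parseB cs s (i + 1) level).val := by
  conv_lhs => rw [parseB]
  rw [dif_pos h]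
  simp only [if_neg ho]
  by_cases hc : cs[i] = ')' ∨ cs[i] = '}'
  · rcases hcl with hcl | hcl
    · exact absurd hc hcl
    · simp only [if_pos hc, if_neg hcl]
  · simp only [if_neg hc]

-- what A's loop still owes once B's parse stops at position j with the given stack pending
def tailSpec (s : String) (cs : List Char) (j : Nat) (stack : List Nat) : List (Int × String) :=
  match stack with
  | [] => []
  | s1 :: stk =>
    if j < cs.length then
      ((stk.length : Int), PySem.Str.slice s (some ((s1 : Int) + 1)) (some (j : Int))) ::
        goA s ((PySem.List.enumerate cs 0).drop (j + 1)) (stk.map (fun a : Nat => (a : Int)))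
    else []

lemma enum_drop_cons (cs : List Char) (i : Nat) (h : i < cs.length) :
    (PySem.List.enumerate cs 0).drop i
      = ((i : Int), cs[i]) :: (PySem.List.enumerate cs 0).drop (i + 1) := by
  have hlen : (PySem.List.enumerate cs 0).length = cs.length := by
    simp [PySem.List.length_enumerate]
  rw [List.drop_eq_getElem_cons (by omega)]
  congr 1
  simp [PySem.List.getElem_enumerate]

lemma enum_drop_nil (cs : List Char) (i : Nat) (h : ¬ i < cs.length) :
    (PySem.List.enumerate cs 0).drop i = [] := by
  apply List.drop_eq_nil_of_le
  simp [PySem.List.length_enumerate]; omega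

lemma main_lemma (s : String) (cs : List Char) :
    ∀ (m i : Nat) (stack : List Nat), cs.length - i ≤ m →
      goA s ((PySem.List.enumerate cs 0).drop i) (stack.map (fun a : Nat => (a : Int)))
        = (parseB cs s i stack.length).val.2
            ++ tailSpec s cs (parseB cs s i stack.length).val.1 stack := by
  intro m
  induction m with
  | zero =>
    intro i stack hm
    have h : ¬ i < cs.length := by omega
    rw [enum_drop_nil cs i h, parseB_eq_stop cs s i stack.length h]
    cases stack with
    | nil => simp [goA, tailSpec]
    | cons s1 stk => simp [goA, tailSpec, h]
  | succ m ih =>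
    intro i stack hm
    by_cases h : i < cs.length
    · rw [enum_drop_cons cs i h]
      by_cases hopen : cs[i] = '(' ∨ cs[i] = '{'
      · -- open bracket: recurse one level deeper, then (on a close) continue after it
        rw [parseB_eq_open cs s i stack.length h hopen]
        have hopen' : cs[i] = '{' ∨ cs[i] = '(' := hopen.symm
        simp only [goA, if_pos hopen']
        have step1 := ih (i + 1) (i :: stack) (by omega)
        simp only [List.map_cons, List.length_cons] at step1
        rw [step1]
        have hji := (parseB cs s (i + 1) (stack.length + 1)).2
        by_cases hj : (parseB cs s (i + 1) (stack.length + 1)).val.1 < cs.length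
        · rw [if_pos hj]
          simp only [tailSpec, if_pos hj]
          have step2 := ih ((parseB cs s (i + 1) (stack.length + 1)).val.1 + 1) stack (by omega)
          rw [step2, tailSpec.eq_def]
          simp
        · rw [if_neg hj]
          cases stack with
          | nil =>
            simp only [List.length_nil] at hj
            simp [tailSpec, hj]
          | cons s1 stk =>
            simp only [List.length_cons] at hj
            simp [tailSpec, hj]
      · by_cases hclose : cs[i] = ')' ∨ cs[i] = '}'
        · have hclose' : cs[i] = '}' ∨ cs[i] = ')' := hclose.symm
          have hopen' : ¬ (cs[i] = '{' ∨ cs[i] = '(') := fun hc => hopen hc.symm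
          cases stack with
          | nil =>
            -- stray close at top level: skipped
            simp only [List.length_nil]
            rw [parseB_eq_skip cs s i 0 h hopen (Or.inr (by omega))]
            simp only [goA, if_neg hopen', if_pos hclose', List.map_nil]
            have step := ih (i + 1) [] (by omega)
            simp only [List.map_nil, List.length_nil] at step
            rw [step]
          | cons s1 stk =>
            -- close matching the innermost open: A yields here; B's parse returns here
            rw [parseB_eq_close_pos cs s i (s1 :: stk).length h hopen hclose (by simp)]
            simp only [goA, List.map_cons, if_neg hopen', if_pos hclose']
            simp only [tailSpec, if_pos h]
            simp
        · have hopen' : ¬ (cs[i] = '{' ∨ cs[i] = '(') := fun hc => hopen hc.symm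
          have hclose' : ¬ (cs[i] = '}' ∨ cs[i] = ')') := fun hc => hclose hc.symm
          rw [parseB_eq_skip cs s i stack.length h hopen (Or.inl hclose)]
          simp only [goA, if_neg hopen', if_neg hclose']
          exact ih (i + 1) stack (by omega)
    · rw [enum_drop_nil cs i h, parseB_eq_stop cs s i stack.length h]
      cases stack with
      | nil => simp [goA, tailSpec]
      | cons s1 stk => simp [goA, tailSpec, h]

-- ===== VERDICT (by name: the statement is the Claim_ definition above) =====
theorem parenthetic_contents_spec : Claim_equal_parenthetic_contents := by
  intro s _
  unfold Spec_parenthetic_contents parenthetic_contents parenthetic_contents_alt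
  have := main_lemma s s.toList (s.toList.length) 0 [] (by omega)
  simpa [tailSpec] using this
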